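-- pv_equiv track=rewrite | github.com/Jonggil-dev/Algo | 이재진/n2 배열 짜르기.py | solution
-- ===== SOURCE A (Python) =====
-- def solution(n, left, right):
--     answer = []
--     ls = list(range(1, n+1))
--     for i in range(left+1, right+2):
--         a = i // n
--         b = i % n
--         if b==0:
--             answer.append(ls[-1])
--         elif a < b:
--             answer.append(ls[b-1])
--         else:
--             answer.append(ls[a])
--     return answer
-- ===== SOURCE B (Python) =====
-- def solution(n, left, right):
--     # Row-blocked construction: the n*n grid's row r holds (r+1) copies of r+1
--     # followed by r+2, r+3, ..., n.  Emit the requested window row by row with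
--     # a replicated constant run plus an arithmetic range -- no per-cell divmod.
--     if right < left:
--         return []
--     out = []
--     first, last = left // n, right // n
--     for r in range(first, last + 1):
--         lo = left - r * n if r == first else 0
--         hi = right - r * n if r == last else n - 1
--         flat = min(hi, r) - lo + 1          # columns lo..min(hi,r) all hold r+1
--         if flat > 0:
--             out += [r + 1] * flat
--         out += range(max(lo, r + 1) + 1, hi + 2)   # columns > r hold col+1
--     return out
-- ===== Notes on version B (the rewrite author's own statement) =====
-- stated objective: faster
-- what changed: B emits the window row by row as a replicated constant run plus an arithmetic range per row, instead of A's per-index divmod loop indexing into a materialised [1..n] list; Pre_ restricts to the grid's natural domain (empty window, or n >= 1 and right < n*n): outside it A raises (n <= 0) or its modulo indexing returns out-of-contract values no one would specify.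
-- outside the precondition, e.g. on solution(1, 0, 1): A returns [1, 1], B returns [1, 2]
import Mathlib
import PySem

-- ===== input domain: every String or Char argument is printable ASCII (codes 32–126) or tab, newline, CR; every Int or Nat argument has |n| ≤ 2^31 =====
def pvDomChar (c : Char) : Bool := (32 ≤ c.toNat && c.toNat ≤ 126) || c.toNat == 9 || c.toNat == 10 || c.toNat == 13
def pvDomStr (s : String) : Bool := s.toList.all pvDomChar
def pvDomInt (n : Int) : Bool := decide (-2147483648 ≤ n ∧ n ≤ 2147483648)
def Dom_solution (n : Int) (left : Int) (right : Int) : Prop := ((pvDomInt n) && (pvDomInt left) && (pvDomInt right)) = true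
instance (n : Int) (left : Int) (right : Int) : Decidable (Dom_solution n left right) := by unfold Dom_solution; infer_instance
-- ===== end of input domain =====

-- B builds the requested window row by row (a replicated constant run plus an arithmetic
-- range per row) instead of A's per-index divmod with indexing into a materialised [1..n].

-- ===== PORT A =====
-- one iteration of A's loop body; Option tracks a possible IndexError from ls[-1]/ls[b-1]/ls[a]
-- or a ZeroDivisionError from i // n (none = the Python raises; such inputs are outside Pre_).
def solutionStep (ls : List Int) (n : Int) (acc : Option (List Int)) (i : Int) : Option (List Int) :=
  match acc with
  | none => none
  | some answer =>
    if n = 0 then none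
    else
      let a := PySem.Int.floordiv i n
      let b := PySem.Int.mod i n
      if b = 0 then
        (PySem.List.pyGet? ls (-1)).map (fun v => answer ++ [v])
      else if a < b then
        (PySem.List.pyGet? ls (b - 1)).map (fun v => answer ++ [v])
      else
        (PySem.List.pyGet? ls a).map (fun v => answer ++ [v])

def solution (n : Int) (left : Int) (right : Int) : List Int :=
  (((PySem.List.pyRange (left + 1) (right + 2) 1).foldl
      (solutionStep (PySem.List.pyRange 1 (n + 1) 1) n) (some [])).getD [])

-- ===== PORT B =====
-- one row's slice: columns lo..min(hi,r) hold r+1 (constant run), columns max(lo,r+1)..hi hold col+1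
def rowSeg (r lo hi : Int) : List Int :=
  (if 0 < min hi r - lo + 1 then List.replicate (min hi r - lo + 1).toNat (r + 1) else [])
    ++ PySem.List.pyRange (max lo (r + 1) + 1) (hi + 2) 1

def solution_alt (n : Int) (left : Int) (right : Int) : List Int :=
  if right < left then []
  else
    (PySem.List.pyRange (PySem.Int.floordiv left n) (PySem.Int.floordiv right n + 1) 1).foldl
      (fun out row =>
        out ++ rowSeg row
          (if row = PySem.Int.floordiv left n then left - row * n else 0)
          (if row = PySem.Int.floordiv right n then right - row * n else n - 1)) []

-- ===== PRECONDITION & SPEC =====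
-- Pre_ is the problem's natural domain: an empty window, or n ≥ 1 with the whole window inside
-- the n*n flattened array.  It excludes out-of-range windows (right ≥ n*n with nonempty range),
-- outside the grid's contract, where A's modulo indexing into the length-n list still returns
-- values neither implementation would be specified to produce (and n ≤ 0, where A raises).
def Pre_solution (n : Int) (left : Int) (right : Int) : Prop :=
  right < left ∨ (1 ≤ n ∧ right < n * n)
instance (n : Int) (left : Int) (right : Int) : Decidable (Pre_solution n left right) := by
  unfold Pre_solution; infer_instance
def pvWitness_solution : Int × Int × Int := (3, 2, 5)

def Spec_solution (n : Int) (left : Int) (right : Int) (out : List Int) : Prop := out = solution_alt n left right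
instance (n : Int) (left : Int) (right : Int) (out : List Int) : Decidable (Spec_solution n left right out) := by unfold Spec_solution; infer_instance

-- ===== CLAIM (what is proved, stated in full; the proofs are below) =====
def Claim_equal_solution : Prop := ∀ (n : Int) (left : Int) (right : Int), Dom_solution n left right → Pre_solution n left right → Spec_solution n left right (solution n left right)

-- ===== LEMMAS AND PROOFS =====

-- the common value of both programs at flattened index k: max(k//n, k%n) + 1
def fmax (n k : Int) : Int :=
  max (PySem.Int.floordiv k n) (PySem.Int.mod k n) + 1

lemma ediv_emod_row (n r c : Int) (hn : 0 < n) (h0 : 0 ≤ c) (h1 : c < n) :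
    (c + n * r) / n = r ∧ (c + n * r) % n = c := by
  constructor
  · rw [Int.add_mul_ediv_left _ _ (ne_of_gt hn), Int.ediv_eq_zero_of_lt h0 h1, zero_add]
  · rw [Int.add_mul_emod_self_left, Int.emod_eq_of_lt h0 h1]

-- A's branch value at loop index i equals fmax at flattened index i - 1.
lemma fmax_of (n i : Int) (hn : 0 < n) (hi : i ≤ n * n) :
    fmax n (i - 1)
      = if PySem.Int.mod i n = 0 then n
        else if PySem.Int.floordiv i n < PySem.Int.mod i n then PySem.Int.mod i n
        else PySem.Int.floordiv i n + 1 := by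
  unfold fmax
  rw [PySem.Int.mod_eq_emod_of_pos hn, PySem.Int.mod_eq_emod_of_pos hn,
      PySem.Int.floordiv_eq_ediv_of_pos hn, PySem.Int.floordiv_eq_ediv_of_pos hn]
  have h1 := Int.ediv_add_emod (i - 1) n
  have h2 := Int.emod_nonneg (i - 1) (ne_of_gt hn)
  have h3 := Int.emod_lt_of_pos (i - 1) hn
  set K := (i - 1) / n with hK
  set Bv := (i - 1) % n with hBv
  by_cases hc : Bv + 1 < n
  · have hi' : i = (Bv + 1) + n * K := by omega
    obtain ⟨hd, hm⟩ := ediv_emod_row n K (Bv + 1) hn (by omega) hc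
    rw [hi', hd, hm]
    split_ifs <;> omega
  · have hBn : Bv = n - 1 := by omega
    have hmul : n * (K + 1) = n * K + n := by ring
    have hi' : i = n * (K + 1) := by omega
    have hb : i % n = 0 := by rw [hi']; exact Int.mul_emod_right n (K + 1)
    have hd : i / n = K + 1 := by
      rw [hi']; exact Int.mul_ediv_cancel_left _ (ne_of_gt hn)
    have hKle : K + 1 ≤ n := by
      have : n * (K + 1) ≤ n * n := by omega
      exact le_of_mul_le_mul_left this hn
    rw [hb, hd]
    split_ifs <;> omega

-- One loop step of A succeeds and appends exactly fmax n (i-1), when i ≤ n*n.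
lemma step_ok (n : Int) (hn : 1 ≤ n) (i : Int) (hi : i ≤ n * n) (answer : List Int) :
    solutionStep (PySem.List.pyRange 1 (n + 1) 1) n (some answer) i
      = some (answer ++ [fmax n (i - 1)]) := by
  have hn0 : n ≠ 0 := by omega
  have hpos : (0 : Int) < n := by omega
  unfold solutionStep
  simp only [hn0, if_false]
  rw [fmax_of n i hpos hi]
  by_cases hb : PySem.Int.mod i n = 0
  · -- b == 0 : ls[-1] = n
    simp only [hb, if_true]
    rw [PySem.List.pyRange_one_succ_right (by omega : (1:Int) ≤ n),
        PySem.List.pyGet?_neg_one_append_singleton]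
    rfl
  · have hblt : PySem.Int.mod i n < n := PySem.Int.mod_lt i hpos
    have hbge : 0 ≤ PySem.Int.mod i n := PySem.Int.mod_nonneg i hpos
    have hb1 : 1 ≤ PySem.Int.mod i n := by omega
    simp only [hb, if_false]
    by_cases hab : PySem.Int.floordiv i n < PySem.Int.mod i n
    · -- a < b : ls[b-1] = b
      simp only [hab, if_true]
      have h1 : (0:Int) ≤ PySem.Int.mod i n - 1 := by omega
      rw [PySem.List.pyGet?_of_nonneg _ h1]
      have hlen : (PySem.Int.mod i n - 1).toNat < (PySem.List.pyRange 1 (n + 1) 1).length := by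
        rw [PySem.List.length_pyRange_one]; omega
      rw [List.getElem?_eq_getElem hlen, PySem.List.getElem_pyRange_one]
      have : 1 + ((PySem.Int.mod i n - 1).toNat : Int) = PySem.Int.mod i n := by omega
      rw [this]
      rfl
    · -- else : ls[a] = a + 1, with 1 ≤ a < n
      simp only [hab, if_false]
      have ha1 : 1 ≤ PySem.Int.floordiv i n := by omega
      have hbad : ¬ n ∣ i := by
        intro hd; exact hb ((PySem.Int.mod_eq_zero_iff_dvd i n).mpr hd)
      have hi' : i < n * n := by
        rcases lt_or_eq_of_le hi with h' | h'
        · exact h'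
        · exact absurd (h' ▸ Dvd.intro n rfl) hbad
      have halt : PySem.Int.floordiv i n < n :=
        (PySem.Int.floordiv_lt_iff_lt_mul hpos).mpr hi'
      have h0 : (0:Int) ≤ PySem.Int.floordiv i n := by omega
      rw [PySem.List.pyGet?_of_nonneg _ h0]
      have hlen : (PySem.Int.floordiv i n).toNat < (PySem.List.pyRange 1 (n + 1) 1).length := by
        rw [PySem.List.length_pyRange_one]; omega
      rw [List.getElem?_eq_getElem hlen, PySem.List.getElem_pyRange_one]
      have : 1 + ((PySem.Int.floordiv i n).toNat : Int) = PySem.Int.floordiv i n + 1 := by omega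
      rw [this]
      rfl

-- A's whole loop, on safe indices, produces the map of fmax values.
lemma fold_ok (n : Int) (hn : 1 ≤ n) (R : List Int)
    (hR : ∀ i ∈ R, i ≤ n * n) (answer : List Int) :
    R.foldl (solutionStep (PySem.List.pyRange 1 (n + 1) 1) n) (some answer)
      = some (answer ++ R.map (fun i => fmax n (i - 1))) := by
  induction R generalizing answer with
  | nil => simp
  | cons i R ih =>
    have h1 := hR i (List.mem_cons_self)
    have h2 : ∀ j ∈ R, j ≤ n * n := fun j hj => hR j (List.mem_cons_of_mem _ hj)
    simp only [List.foldl_cons, step_ok n hn i h1 answer, ih h2, List.map_cons,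
      List.append_assoc, List.cons_append, List.nil_append]

lemma map_const_pyRange (a b v : Int) :
    (PySem.List.pyRange a b 1).map (fun _ => v) = List.replicate (b - a).toNat v := by
  rw [PySem.List.pyRange_one, List.map_map]
  have h : List.map ((fun _ => v) ∘ fun k : Nat => a + (k : Int)) (List.range (b - a).toNat)
      = List.map (fun _ => v) (List.range (b - a).toNat) := rfl
  rw [h, List.map_const', List.length_range]

lemma map_add_pyRange (a b d : Int) :
    (PySem.List.pyRange a b 1).map (fun k => k + d) = PySem.List.pyRange (a + d) (b + d) 1 := by
  rw [PySem.List.pyRange_one, PySem.List.pyRange_one, List.map_map]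
  have hb : b + d - (a + d) = b - a := by ring
  rw [hb]
  apply List.map_congr_left
  intro k _
  simp only [Function.comp]
  omega

-- value of fmax inside one row: index k = c + n*r with 0 ≤ c < n gives max r c + 1
lemma fmax_row (n r c : Int) (hn : 0 < n) (h0 : 0 ≤ c) (h1 : c < n) :
    fmax n (c + n * r) = max r c + 1 := by
  unfold fmax
  obtain ⟨hd, hm⟩ := ediv_emod_row n r c hn h0 h1
  rw [PySem.Int.floordiv_eq_ediv_of_pos hn, PySem.Int.mod_eq_emod_of_pos hn, hd, hm]

-- the flat (constant) part of a row, as a map of fmax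
lemma seg_const (n r lo hi : Int) (hn : 0 < n) (h0 : 0 ≤ lo) (h1 : hi < n) (hhir : hi ≤ r) :
    (PySem.List.pyRange (r * n + lo) (r * n + hi + 1) 1).map (fmax n)
      = List.replicate (hi - lo + 1).toNat (r + 1) := by
  have hc : ∀ k ∈ PySem.List.pyRange (r * n + lo) (r * n + hi + 1) 1, fmax n k = r + 1 := by
    intro k hk
    rw [PySem.List.mem_pyRange_one] at hk
    have hnr : n * r = r * n := mul_comm n r
    have hkc : k = (k - r * n) + n * r := by omega
    rw [hkc, fmax_row n r (k - r * n) hn (by omega) (by omega)]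
    omega
  rw [List.map_congr_left hc, map_const_pyRange]
  congr 1
  omega

-- the increasing part of a row, as a map of fmax
lemma seg_inc (n r lo hi : Int) (hn : 0 < n) (h0 : 0 ≤ lo) (h1 : hi < n) (hrlo : r < lo) :
    (PySem.List.pyRange (r * n + lo) (r * n + hi + 1) 1).map (fmax n)
      = PySem.List.pyRange (lo + 1) (hi + 2) 1 := by
  have hc : ∀ k ∈ PySem.List.pyRange (r * n + lo) (r * n + hi + 1) 1,
      fmax n k = k + (1 - r * n) := by
    intro k hk
    rw [PySem.List.mem_pyRange_one] at hk
    have hnr : n * r = r * n := mul_comm n r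
    have hkc : k = (k - r * n) + n * r := by omega
    rw [hkc, fmax_row n r (k - r * n) hn (by omega) (by omega)]
    omega
  rw [List.map_congr_left hc, map_add_pyRange]
  have e1 : r * n + lo + (1 - r * n) = lo + 1 := by ring
  have e2 : r * n + hi + 1 + (1 - r * n) = hi + 2 := by ring
  rw [e1, e2]

-- one full row slice equals the map of fmax over its flattened index range
lemma rowSeg_eq (n r lo hi : Int) (hn : 0 < n) (h0 : 0 ≤ lo) (h1 : hi < n) (hlh : lo ≤ hi) :
    rowSeg r lo hi = (PySem.List.pyRange (r * n + lo) (r * n + hi + 1) 1).map (fmax n) := by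
  unfold rowSeg
  by_cases hhr : hi ≤ r
  · -- everything constant
    have hmin : min hi r = hi := by omega
    have hmax : max lo (r + 1) = r + 1 := by omega
    rw [hmin, hmax, if_pos (by omega : (0:Int) < hi - lo + 1),
        show PySem.List.pyRange (r + 1 + 1) (hi + 2) 1 = [] from
          PySem.List.pyRange_one_eq_nil (by omega),
        seg_const n r lo hi hn h0 h1 hhr, List.append_nil]
  · by_cases hrlo : r < lo
    · -- everything increasing
      have hmin : ¬ (0 : Int) < min hi r - lo + 1 := by omega
      have hmax : max lo (r + 1) = lo := by omega
      rw [if_neg hmin, hmax, seg_inc n r lo hi hn h0 h1 hrlo, List.nil_append]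
    · -- split at column r + 1
      have hmin : min hi r = r := by omega
      have hmax : max lo (r + 1) = r + 1 := by omega
      rw [hmin, hmax, if_pos (by omega : (0:Int) < r - lo + 1),
          PySem.List.pyRange_one_append (r * n + lo) (r * n + r + 1) (r * n + hi + 1)
            (by omega) (by omega),
          List.map_append]
      congr 1
      · have := seg_const n r lo r hn h0 (by omega) (le_refl r)
        rw [this]
      · have := seg_inc n r (r + 1) hi hn (by omega) h1 (by omega)
        have e2 : r * n + (r + 1) = r * n + r + 1 := by ring
        rw [e2] at this
        rw [this]

-- B's fold over the full rows f..last (all past the first row) appends the map of fmax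
-- over the remaining flattened range.
lemma fold_rows (n l r : Int) (hn : 0 < n) (hrn : r < n * n) :
    ∀ (m : Nat) (f : Int) (acc : List Int),
      PySem.Int.floordiv l n < f → f ≤ PySem.Int.floordiv r n + 1 →
      (PySem.Int.floordiv r n + 1 - f).toNat = m →
      (PySem.List.pyRange f (PySem.Int.floordiv r n + 1) 1).foldl
        (fun out row =>
          out ++ rowSeg row
            (if row = PySem.Int.floordiv l n then l - row * n else 0)
            (if row = PySem.Int.floordiv r n then r - row * n else n - 1)) acc
      = acc ++ (PySem.List.pyRange (f * n) (r + 1) 1).map (fmax n) := by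
  have hidr := PySem.Int.floordiv_mul_add_mod r n
  have hmr0 := PySem.Int.mod_nonneg r hn
  have hmr1 := PySem.Int.mod_lt r hn
  set L := PySem.Int.floordiv r n with hL
  intro m
  induction m with
  | zero =>
    intro f acc hf1 hf2 hm
    have hf : f = L + 1 := by omega
    subst hf
    rw [PySem.List.pyRange_one_eq_nil (le_refl (L + 1))]
    have hLn : (L + 1) * n = L * n + n := by ring
    rw [PySem.List.pyRange_one_eq_nil (by omega : r + 1 ≤ (L + 1) * n)]
    simp
  | succ m ih =>
    intro f acc hf1 hf2 hm
    have hfL : f ≤ L := by omega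
    rw [PySem.List.pyRange_one_cons (by omega : f < L + 1)]
    rw [List.foldl_cons]
    rw [if_neg (by omega : ¬ f = PySem.Int.floordiv l n)]
    by_cases hfl : f = L
    · -- last row
      have hfn : f * n = L * n := by rw [hfl]
      rw [if_pos hfl]
      rw [show PySem.List.pyRange (f + 1) (L + 1) 1 = [] from
            PySem.List.pyRange_one_eq_nil (by omega)]
      simp only [List.foldl_nil]
      rw [rowSeg_eq n f 0 (r - f * n) hn (le_refl 0) (by omega) (by omega)]
      have e1 : f * n + 0 = f * n := by ring
      have e2 : f * n + (r - f * n) + 1 = r + 1 := by ring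
      rw [e1, e2]
    · -- a middle full row
      rw [if_neg (by omega : ¬ f = L)]
      rw [rowSeg_eq n f 0 (n - 1) hn (le_refl 0) (by omega) (by omega)]
      rw [ih (f + 1) _ (by omega) (by omega) (by omega)]
      have hfL' : f + 1 ≤ L := by omega
      have hmono : (f + 1) * n ≤ L * n :=
        mul_le_mul_of_nonneg_right hfL' (by omega)
      rw [PySem.List.pyRange_one_append (f * n) ((f + 1) * n) (r + 1)
            (by nlinarith) (by omega), List.map_append]
      have e1 : f * n + 0 = f * n := by ring
      have e2 : f * n + (n - 1) + 1 = (f + 1) * n := by ring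
      rw [e1, e2, List.append_assoc]

-- B equals the map of fmax over the window (nonempty case).
lemma B_eq (n l r : Int) (hn : 0 < n) (hlr : l ≤ r) (hrn : r < n * n) :
    solution_alt n l r = (PySem.List.pyRange l (r + 1) 1).map (fmax n) := by
  unfold solution_alt
  rw [if_neg (by omega : ¬ r < l)]
  have hidr := PySem.Int.floordiv_mul_add_mod r n
  have hmr0 := PySem.Int.mod_nonneg r hn
  have hmr1 := PySem.Int.mod_lt r hn
  have hidl := PySem.Int.floordiv_mul_add_mod l n
  have hml0 := PySem.Int.mod_nonneg l hn
  have hml1 := PySem.Int.mod_lt l hn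
  set F := PySem.Int.floordiv l n with hF
  set L := PySem.Int.floordiv r n with hL
  have hFL : F ≤ L := by
    by_contra hcon
    have : L + 1 ≤ F := by omega
    have := mul_le_mul_of_nonneg_right this (by omega : (0:Int) ≤ n)
    nlinarith
  rw [PySem.List.pyRange_one_cons (by omega : F < L + 1), List.foldl_cons,
      if_pos rfl]
  by_cases hFeL : F = L
  · -- single row
    rw [if_pos hFeL]
    rw [show F = L from hFeL] at hidl ⊢
    rw [PySem.List.pyRange_one_eq_nil (le_refl (L + 1))]
    simp only [List.foldl_nil]
    rw [rowSeg_eq n L (l - L * n) (r - L * n) hn (by omega) (by omega) (by omega)]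
    have e1 : L * n + (l - L * n) = l := by ring
    have e2 : L * n + (r - L * n) + 1 = r + 1 := by ring
    rw [e1, e2, List.nil_append]
  · -- first row partial, then full rows via fold_rows
    rw [if_neg hFeL]
    rw [rowSeg_eq n F (l - F * n) (n - 1) hn (by omega) (by omega) (by omega)]
    have e1 : F * n + (l - F * n) = l := by ring
    have e2 : F * n + (n - 1) + 1 = (F + 1) * n := by ring
    rw [e1, e2, List.nil_append]
    rw [fold_rows n l r hn hrn ((L + 1 - (F + 1)).toNat) (F + 1) _ (by omega) (by omega) rfl]
    have hmono : (F + 1) * n ≤ L * n :=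
      mul_le_mul_of_nonneg_right (by omega : F + 1 ≤ L) (by omega)
    rw [PySem.List.pyRange_one_append l ((F + 1) * n) (r + 1)
          (by nlinarith) (by omega), List.map_append]

-- ===== VERDICT (by name: the statement is the Claim_ definition above) =====
theorem solution_spec : Claim_equal_solution := by
  intro n left right _ hpre
  unfold Spec_solution
  by_cases hempty : right < left
  · unfold solution solution_alt
    rw [PySem.List.pyRange_one_eq_nil (by omega : right + 2 ≤ left + 1), if_pos hempty]
    rfl
  · have hn : 1 ≤ n := by
      rcases hpre with h | ⟨h, _⟩
      · omega
      · exact h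
    have hrn : right < n * n := by
      rcases hpre with h | ⟨_, h⟩
      · omega
      · exact h
    have hR : ∀ i ∈ PySem.List.pyRange (left + 1) (right + 2) 1, i ≤ n * n := by
      intro i hi
      rw [PySem.List.mem_pyRange_one] at hi
      omega
    unfold solution
    rw [fold_ok n hn _ hR []]
    simp only [Option.getD_some, List.nil_append]
    rw [B_eq n left right (by omega) (by omega) hrn]
    rw [PySem.List.pyRange_one (left + 1) (right + 2), PySem.List.pyRange_one left (right + 1),
        List.map_map, List.map_map]
    have hlen : (right + 2 - (left + 1)).toNat = (right + 1 - left).toNat := by omega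
    rw [hlen]
    apply List.map_congr_left
    intro k _
    simp only [Function.comp]
    congr 1
    omega
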